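-- pv_equiv track=rewrite | github.com/sieukim/algorithm-programmers | level0/ex14.py | solution
-- ===== SOURCE A (Python) =====
-- def solution(s):
--     answer, stack = 0, []
--
--     for v1 in s.split(' '):
--         if stack and v1 == 'Z':
--             v2 = stack.pop()
--             answer -= v2
--         else:
--             answer += int(v1)
--             stack.append(int(v1))
--
--     return answer
-- ===== SOURCE B (Python) =====
-- def solution(s):
--     # Right-to-left pass: a 'Z' cancels the nearest uncancelled number to its
--     # left, so scanning from the right a counter of pending Z's replaces the
--     # stack entirely; uncancelled tokens are summed directly.
--     pending = 0
--     total = 0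
--     for v in reversed(s.split(' ')):
--         if v == 'Z':
--             pending += 1
--         elif pending > 0:
--             pending -= 1
--         else:
--             total += int(v)
--     return total
-- ===== Notes on version B (the rewrite author's own statement) =====
-- stated objective: alternative
-- what changed: Replaces the left-to-right stack-and-running-sum with a single right-to-left pass that keeps only a counter of pending 'Z's and sums the uncancelled tokens.
import Mathlib
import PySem

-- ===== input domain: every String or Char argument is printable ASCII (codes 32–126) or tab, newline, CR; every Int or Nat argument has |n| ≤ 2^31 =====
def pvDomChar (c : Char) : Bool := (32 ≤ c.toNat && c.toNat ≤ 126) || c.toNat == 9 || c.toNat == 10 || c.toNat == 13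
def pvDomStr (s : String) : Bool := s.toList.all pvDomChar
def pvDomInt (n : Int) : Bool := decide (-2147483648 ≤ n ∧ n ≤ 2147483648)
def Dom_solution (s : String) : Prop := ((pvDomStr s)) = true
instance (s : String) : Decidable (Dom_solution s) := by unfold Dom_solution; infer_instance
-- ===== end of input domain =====

-- B replaces A's stack + running sum by one right-to-left pass with a pending-'Z'
-- counter, summing the uncancelled tokens (alternative decomposition, same cost).

-- tokens of s.split(' '): split? is total here since the separator " " is nonempty
def pvToks (s : String) : List String := (PySem.Str.split? s " ").getD []

-- ===== PORT A =====
-- stack is modelled head-as-top: list append/pop at the Python-list end = cons/tail here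
def solution (s : String) : Int :=
  ((pvToks s).foldl
    (fun (st : Int × List Int) v1 =>
      if st.2 ≠ [] ∧ v1 = "Z" then
        (st.1 - st.2.headI, st.2.tail)            -- v2 = stack.pop(); answer -= v2
      else
        (st.1 + (PySem.Int.ofStr? v1).getD 0,     -- answer += int(v1)
         (PySem.Int.ofStr? v1).getD 0 :: st.2))   -- stack.append(int(v1))
    (0, [])).1

-- ===== PORT B =====
-- foldr = the 'for v in reversed(...)' loop (rightmost token processed first)
def solution_alt (s : String) : Int :=
  ((pvToks s).foldr
    (fun v (st : Nat × Int) =>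
      if v = "Z" then (st.1 + 1, st.2)
      else if 0 < st.1 then (st.1 - 1, st.2)
      else (st.1, st.2 + (PySem.Int.ofStr? v).getD 0))
    (0, 0)).2

-- ===== PRECONDITION & SPEC =====
-- Pre_ excludes exactly the inputs on which Python A raises ValueError: a Z token
-- with no earlier uncancelled number, or a non-Z token that is not an int literal.
-- The count bound says the i-th token, when it is Z, still has a number to pop.
def Pre_solution (s : String) : Prop :=
  ∀ i, (h : i < (pvToks s).length) →
    ((pvToks s)[i] = "Z" →
        2 * (((pvToks s).take i).count "Z") < i) ∧
    ((pvToks s)[i] ≠ "Z" →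
        (PySem.Int.ofStr? (pvToks s)[i]).isSome = true)
instance (s : String) : Decidable (Pre_solution s) := by unfold Pre_solution; infer_instance

def pvWitness_solution : String := "1 2 Z 3"

def Spec_solution (s : String) (out : Int) : Prop := out = solution_alt s
instance (s : String) (out : Int) : Decidable (Spec_solution s out) := by unfold Spec_solution; infer_instance

-- ===== CLAIM (what is proved, stated in full; the proofs are below) =====
def Claim_equal_solution : Prop := ∀ (s : String), Dom_solution s → Pre_solution s → Spec_solution s (solution s)

-- ===== LEMMAS AND PROOFS =====

-- proof-side names for the two loop bodies
def pvStepA (st : Int × List Int) (v1 : String) : Int × List Int :=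
  if st.2 ≠ [] ∧ v1 = "Z" then (st.1 - st.2.headI, st.2.tail)
  else (st.1 + (PySem.Int.ofStr? v1).getD 0, (PySem.Int.ofStr? v1).getD 0 :: st.2)

def pvStepS (st : List Int) (v1 : String) : List Int :=
  if st ≠ [] ∧ v1 = "Z" then st.tail else (PySem.Int.ofStr? v1).getD 0 :: st

def pvStepB (v : String) (st : Nat × Int) : Nat × Int :=
  if v = "Z" then (st.1 + 1, st.2)
  else if 0 < st.1 then (st.1 - 1, st.2)
  else (st.1, st.2 + (PySem.Int.ofStr? v).getD 0)

-- 'the stack stays deep enough': A's guard never sees an empty stack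
def pvOK : Nat → List String → Prop
  | _, [] => True
  | n, v :: ts => if v = "Z" then 0 < n ∧ pvOK (n - 1) ts else pvOK (n + 1) ts

theorem pvFoldA_eq (ts : List String) : ∀ (ans : Int) (st : List Int),
    ts.foldl pvStepA (ans, st) =
      (ans - st.sum + (ts.foldl pvStepS st).sum, ts.foldl pvStepS st) := by
  induction ts with
  | nil => intro ans st; simp
  | cons v ts ih =>
    intro ans st
    simp only [List.foldl_cons]
    by_cases h : st ≠ [] ∧ v = "Z"
    · obtain ⟨x, st', rfl⟩ := List.exists_cons_of_ne_nil h.1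
      rw [pvStepA, pvStepS, if_pos h, if_pos h, ih]
      simp; ring_nf
    · rw [pvStepA, pvStepS, if_neg h, if_neg h, ih]
      simp; ring_nf

theorem pvFoldS_eq (ts : List String) : ∀ (st : List Int), pvOK st.length ts →
    (ts.foldl pvStepS st).sum =
      (st.drop (ts.foldr pvStepB (0, 0)).1).sum + (ts.foldr pvStepB (0, 0)).2 ∧
    (ts.foldr pvStepB (0, 0)).1 ≤ st.length := by
  induction ts with
  | nil => intro st _; simp
  | cons v ts ih =>
    intro st hok
    simp only [List.foldl_cons, List.foldr_cons]
    by_cases hz : v = "Z"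
    · rw [pvOK, if_pos hz] at hok
      obtain ⟨hpos, hok'⟩ := hok
      obtain ⟨x, st', rfl⟩ := List.exists_cons_of_ne_nil (List.ne_nil_of_length_pos hpos)
      have hok'' : pvOK st'.length ts := by simpa using hok'
      obtain ⟨h1, h2⟩ := ih st' hok''
      rw [pvStepS, if_pos ⟨by simp, hz⟩]
      rw [pvStepB, if_pos hz]
      simp only [List.tail_cons]
      exact ⟨by simpa [List.drop_succ_cons] using h1, by simpa using Nat.succ_le_succ h2⟩
    · rw [pvOK, if_neg hz] at hok
      rw [pvStepS, if_neg (by simp [hz])]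
      have hok' : pvOK ((PySem.Int.ofStr? v).getD 0 :: st).length ts := by simpa using hok
      obtain ⟨h1, h2⟩ := ih _ hok'
      rw [pvStepB, if_neg hz]
      by_cases hk : 0 < (ts.foldr pvStepB (0, 0)).1
      · rw [if_pos hk]
        constructor
        · rw [h1]
          obtain ⟨k, hk'⟩ := Nat.exists_eq_add_of_le hk
          simp [hk', List.drop_succ_cons, Nat.add_comm]
        · simp at h2; omega
      · rw [if_neg hk]
        have hk0 : (ts.foldr pvStepB (0, 0)).1 = 0 := by omega
        constructor
        · rw [h1, hk0]; simp; ring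
        · omega
  
theorem pvPre_OK (ts : List String)
    (hp : ∀ i, (h : i < ts.length) → ts[i] = "Z" → 2 * ((ts.take i).count "Z") < i) :
    pvOK 0 ts := by
  suffices H : ∀ ts : List String, ∀ n : Nat,
      (∀ i, (h : i < ts.length) → ts[i] = "Z" → 2 * ((ts.take i).count "Z") < n + i) →
      pvOK n ts by
    exact H ts 0 (by simpa using hp)
  intro ts
  induction ts with
  | nil => intro n _; trivial
  | cons v ts ih =>
    intro n h
    by_cases hz : v = "Z"
    · rw [pvOK, if_pos hz]
      have h0 : 0 < n := by have := h 0 (by simp) (by simpa using hz); omega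
      refine ⟨h0, ih (n - 1) ?_⟩
      intro i hi hzi
      have := h (i + 1) (by simpa using Nat.succ_lt_succ hi) (by simpa using hzi)
      simp [List.take_succ_cons, hz] at this
      omega
    · rw [pvOK, if_neg hz]
      apply ih
      intro i hi hzi
      have := h (i + 1) (by simpa using Nat.succ_lt_succ hi) (by simpa using hzi)
      simp [List.take_succ_cons, hz] at this
      omega

-- ===== VERDICT (by name: the statement is the Claim_ definition above) =====
theorem solution_spec : Claim_equal_solution := by
  intro s _ hpre
  unfold Pre_solution at hpre
  unfold Spec_solution solution solution_alt
  have hA := pvFoldA_eq (pvToks s) 0 []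
  have hok : pvOK 0 (pvToks s) :=
    pvPre_OK _ (fun i h hz => (hpre i h).1 hz)
  have hS := pvFoldS_eq (pvToks s) [] (by simpa using hok)
  show ((pvToks s).foldl pvStepA (0, [])).1 =
    ((pvToks s).foldr pvStepB (0, 0)).2
  rw [hA]
  show (0 : Int) - List.sum [] + ((pvToks s).foldl pvStepS []).sum = _
  rw [hS.1]
  simp
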